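-- pv_equiv track=rewrite | github.com/quan16369/Nemotron-Kaggle | nemotron/reasoners/bit_manipulation.py | _build_three_bit_column
-- ===== SOURCE A (Python) =====
-- from typing import Callable, Dict, List, Literal, Optional, Sequence, Tuple
--
-- def _bit_not(bit: str) -> str:
--     return "1" if bit == "0" else "0"
--
-- def _evaluate_binary(a: str, b: str, family: str) -> str:
--     if family in ("AND", "AND-NOT"):
--         return "1" if a == "1" and b == "1" else "0"
--     if family in ("OR", "OR-NOT"):
--         return "1" if a == "1" or b == "1" else "0"
--     if family in ("XOR", "XOR-NOT"):
--         return "1" if a != b else "0"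
--     raise ValueError(f"Unsupported family {family}")
--
-- def _eval_three_bit_expr(
--     a: str,
--     b: str,
--     c: str,
--     op1: str,
--     op2: str,
--     neg_mask: int,
--     assoc: int,
-- ) -> str:
--     xa = _bit_not(a) if (neg_mask & 1) else a
--     xb = _bit_not(b) if (neg_mask & 2) else b
--     xc = _bit_not(c) if (neg_mask & 4) else c
--     if assoc == 0:
--         left = _evaluate_binary(xa, xb, op1)
--         return _evaluate_binary(left, xc, op2)
--     right = _evaluate_binary(xb, xc, op2)
--     return _evaluate_binary(xa, right, op1)
--
-- def _build_three_bit_column(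
--     inputs: Sequence[str],
--     i: int,
--     j: int,
--     k: int,
--     op1: str,
--     op2: str,
--     neg_mask: int,
--     assoc: int,
-- ) -> str:
--     out: list[str] = []
--     for bits in inputs:
--         out.append(
--             _eval_three_bit_expr(
--                 bits[i], bits[j], bits[k], op1, op2, neg_mask, assoc
--             )
--         )
--     return "".join(out)
-- ===== SOURCE B (Python) =====
-- def _build_three_bit_column(inputs, i, j, k, op1, op2, neg_mask, assoc):
--     if not inputs:
--         return ""
--     # staged column-wise passes: extract the three columns, negate whole
--     # columns, then zip-combine whole columns in the associativity order
--     col_a = [bits[i] for bits in inputs]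
--     col_b = [bits[j] for bits in inputs]
--     col_c = [bits[k] for bits in inputs]
--     if neg_mask & 1:
--         col_a = ["1" if c == "0" else "0" for c in col_a]
--     if neg_mask & 2:
--         col_b = ["1" if c == "0" else "0" for c in col_b]
--     if neg_mask & 4:
--         col_c = ["1" if c == "0" else "0" for c in col_c]
--
--     def combine(xs, ys, family):
--         if family in ("AND", "AND-NOT"):
--             return ["1" if x == "1" and y == "1" else "0" for x, y in zip(xs, ys)]
--         if family in ("OR", "OR-NOT"):
--             return ["1" if x == "1" or y == "1" else "0" for x, y in zip(xs, ys)]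
--         if family in ("XOR", "XOR-NOT"):
--             return ["1" if x != y else "0" for x, y in zip(xs, ys)]
--         raise ValueError(f"Unsupported family {family}")
--
--     if assoc == 0:
--         return "".join(combine(combine(col_a, col_b, op1), col_c, op2))
--     return "".join(combine(col_a, combine(col_b, col_c, op2), op1))
-- ===== Notes on version B (the rewrite author's own statement) =====
-- stated objective: alternative
-- what changed: B is column-oriented: it extracts the three character columns in full, applies each negation as a whole-column pass, and combines whole columns with zip-based binary passes in the associativity order, instead of A's single row loop that evaluates the recursive three-bit expression per row.
import Mathlib
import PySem

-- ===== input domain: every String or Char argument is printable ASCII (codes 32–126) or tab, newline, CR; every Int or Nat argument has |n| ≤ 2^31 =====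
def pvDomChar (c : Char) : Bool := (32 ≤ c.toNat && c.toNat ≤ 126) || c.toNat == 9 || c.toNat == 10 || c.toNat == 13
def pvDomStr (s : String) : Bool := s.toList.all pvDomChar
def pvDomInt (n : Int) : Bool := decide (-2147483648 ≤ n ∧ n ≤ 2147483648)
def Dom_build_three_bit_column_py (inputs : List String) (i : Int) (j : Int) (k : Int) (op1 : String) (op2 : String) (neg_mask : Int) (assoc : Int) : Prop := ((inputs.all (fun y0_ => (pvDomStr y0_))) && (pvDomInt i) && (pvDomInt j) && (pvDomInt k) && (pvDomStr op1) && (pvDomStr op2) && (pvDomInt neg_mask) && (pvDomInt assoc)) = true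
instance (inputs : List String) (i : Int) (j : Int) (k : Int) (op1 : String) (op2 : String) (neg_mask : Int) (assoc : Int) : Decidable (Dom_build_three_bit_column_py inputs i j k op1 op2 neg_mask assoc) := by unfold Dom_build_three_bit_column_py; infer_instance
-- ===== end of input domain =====

-- B is column-oriented: extract the three columns, negate whole columns, zip-combine whole
-- columns in the associativity order — a staged-passes decomposition of A's per-row loop.

-- ===== PORT A =====
def pvBitNot (bit : Char) : Char := if bit = '0' then '1' else '0'

-- _evaluate_binary: none = ValueError
def pvEvalBinary (a b : Char) (family : String) : Option Char :=
  if family = "AND" ∨ family = "AND-NOT" then some (if a = '1' ∧ b = '1' then '1' else '0')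
  else if family = "OR" ∨ family = "OR-NOT" then some (if a = '1' ∨ b = '1' then '1' else '0')
  else if family = "XOR" ∨ family = "XOR-NOT" then some (if a ≠ b then '1' else '0')
  else none

def pvEvalThree (a b c : Char) (op1 op2 : String) (neg_mask assoc : Int) : Option Char :=
  let xa := if neg_mask.land 1 ≠ 0 then pvBitNot a else a
  let xb := if neg_mask.land 2 ≠ 0 then pvBitNot b else b
  let xc := if neg_mask.land 4 ≠ 0 then pvBitNot c else c
  if assoc = 0 then
    match pvEvalBinary xa xb op1 with
    | some left => pvEvalBinary left xc op2
    | none => none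
  else
    match pvEvalBinary xb xc op2 with
    | some right => pvEvalBinary xa right op1
    | none => none

-- loop body of A; raising rows (IndexError/ValueError) are skipped — outside Pre_
def pvStepA (i j k : Int) (op1 op2 : String) (neg_mask assoc : Int)
    (out : List Char) (bits : String) : List Char :=
  match PySem.Str.pyGet? bits i, PySem.Str.pyGet? bits j, PySem.Str.pyGet? bits k with
  | some a, some b, some c =>
    match pvEvalThree a b c op1 op2 neg_mask assoc with
    | some r => out ++ [r]
    | none => out
  | _, _, _ => out

def build_three_bit_column_py (inputs : List String) (i : Int) (j : Int) (k : Int) (op1 : String) (op2 : String) (neg_mask : Int) (assoc : Int) : String :=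
  String.ofList (inputs.foldl (pvStepA i j k op1 op2 neg_mask assoc) [])

-- ===== PORT B =====
-- [bits[idx] for bits in inputs]: none = IndexError on some row
def pvCol? (inputs : List String) (idx : Int) : Option (List Char) :=
  inputs.mapM (fun bits => PySem.Str.pyGet? bits idx)

-- ["1" if c == "0" else "0" for c in l]
def pvNegCol (l : List Char) : List Char := l.map (fun c => if c = '0' then '1' else '0')

-- combine(xs, ys, family): none = ValueError
def pvCombine? (xs ys : List Char) (family : String) : Option (List Char) :=
  if family = "AND" ∨ family = "AND-NOT" then
    some (List.zipWith (fun x y => if x = '1' ∧ y = '1' then '1' else '0') xs ys)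
  else if family = "OR" ∨ family = "OR-NOT" then
    some (List.zipWith (fun x y => if x = '1' ∨ y = '1' then '1' else '0') xs ys)
  else if family = "XOR" ∨ family = "XOR-NOT" then
    some (List.zipWith (fun x y => if x ≠ y then '1' else '0') xs ys)
  else none

def build_three_bit_column_py_alt (inputs : List String) (i : Int) (j : Int) (k : Int) (op1 : String) (op2 : String) (neg_mask : Int) (assoc : Int) : String :=
  if inputs = [] then ""
  else
    match pvCol? inputs i, pvCol? inputs j, pvCol? inputs k with
    | some ca0, some cb0, some cc0 =>
      let ca := if neg_mask.land 1 ≠ 0 then pvNegCol ca0 else ca0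
      let cb := if neg_mask.land 2 ≠ 0 then pvNegCol cb0 else cb0
      let cc := if neg_mask.land 4 ≠ 0 then pvNegCol cc0 else cc0
      let res := if assoc = 0 then (pvCombine? ca cb op1).bind (fun l => pvCombine? l cc op2)
                 else (pvCombine? cb cc op2).bind (fun r => pvCombine? ca r op1)
      match res with
      | some l => String.ofList l
      | none => ""      -- unreachable inside Pre_ (ValueError in Python)
    | _, _, _ => ""     -- unreachable inside Pre_ (IndexError in Python)

-- ===== PRECONDITION & SPEC =====
-- Pre_ excludes exactly the inputs where A raises: a nonempty inputs list with an unsupported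
-- operator family (ValueError) or a row index out of Python's range for some row (IndexError).
def Pre_build_three_bit_column_py (inputs : List String) (i : Int) (j : Int) (k : Int) (op1 : String) (op2 : String) (neg_mask : Int) (assoc : Int) : Prop :=
  inputs = [] ∨
    ((op1 = "AND" ∨ op1 = "AND-NOT" ∨ op1 = "OR" ∨ op1 = "OR-NOT" ∨ op1 = "XOR" ∨ op1 = "XOR-NOT") ∧
      (op2 = "AND" ∨ op2 = "AND-NOT" ∨ op2 = "OR" ∨ op2 = "OR-NOT" ∨ op2 = "XOR" ∨ op2 = "XOR-NOT") ∧
      ∀ s ∈ inputs, PySem.Raise.InRange s.toList.length i ∧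
        PySem.Raise.InRange s.toList.length j ∧ PySem.Raise.InRange s.toList.length k)

instance (inputs : List String) (i : Int) (j : Int) (k : Int) (op1 : String) (op2 : String) (neg_mask : Int) (assoc : Int) : Decidable (Pre_build_three_bit_column_py inputs i j k op1 op2 neg_mask assoc) := by unfold Pre_build_three_bit_column_py; infer_instance

def pvWitness_build_three_bit_column_py : List String × Int × Int × Int × String × String × Int × Int :=
  (["010", "110"], 0, 1, 2, "AND", "OR", 3, 0)

def Spec_build_three_bit_column_py (inputs : List String) (i : Int) (j : Int) (k : Int) (op1 : String) (op2 : String) (neg_mask : Int) (assoc : Int) (out : String) : Prop := out = build_three_bit_column_py_alt inputs i j k op1 op2 neg_mask assoc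
instance (inputs : List String) (i : Int) (j : Int) (k : Int) (op1 : String) (op2 : String) (neg_mask : Int) (assoc : Int) (out : String) : Decidable (Spec_build_three_bit_column_py inputs i j k op1 op2 neg_mask assoc out) := by unfold Spec_build_three_bit_column_py; infer_instance

-- ===== CLAIM =====
def Claim_equal_build_three_bit_column_py : Prop := ∀ (inputs : List String) (i : Int) (j : Int) (k : Int) (op1 : String) (op2 : String) (neg_mask : Int) (assoc : Int), Dom_build_three_bit_column_py inputs i j k op1 op2 neg_mask assoc → Pre_build_three_bit_column_py inputs i j k op1 op2 neg_mask assoc → Spec_build_three_bit_column_py inputs i j k op1 op2 neg_mask assoc (build_three_bit_column_py inputs i j k op1 op2 neg_mask assoc)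

-- ===== LEMMAS AND PROOFS =====

theorem pvWitness_ok :
    Dom_build_three_bit_column_py (pvWitness_build_three_bit_column_py.1) (pvWitness_build_three_bit_column_py.2.1) (pvWitness_build_three_bit_column_py.2.2.1) (pvWitness_build_three_bit_column_py.2.2.2.1) (pvWitness_build_three_bit_column_py.2.2.2.2.1) (pvWitness_build_three_bit_column_py.2.2.2.2.2.1) (pvWitness_build_three_bit_column_py.2.2.2.2.2.2.1) (pvWitness_build_three_bit_column_py.2.2.2.2.2.2.2) ∧
    Pre_build_three_bit_column_py (pvWitness_build_three_bit_column_py.1) (pvWitness_build_three_bit_column_py.2.1) (pvWitness_build_three_bit_column_py.2.2.1) (pvWitness_build_three_bit_column_py.2.2.2.1) (pvWitness_build_three_bit_column_py.2.2.2.2.1) (pvWitness_build_three_bit_column_py.2.2.2.2.2.1) (pvWitness_build_three_bit_column_py.2.2.2.2.2.2.1) (pvWitness_build_three_bit_column_py.2.2.2.2.2.2.2) := by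
  constructor
  · decide
  · unfold Pre_build_three_bit_column_py; decide

-- proof-side: the binary function a supported family denotes
def pvFamily (op : String) : Option (Char → Char → Char) :=
  if op = "AND" ∨ op = "AND-NOT" then some (fun a b => if a = '1' ∧ b = '1' then '1' else '0')
  else if op = "OR" ∨ op = "OR-NOT" then some (fun a b => if a = '1' ∨ b = '1' then '1' else '0')
  else if op = "XOR" ∨ op = "XOR-NOT" then some (fun a b => if a ≠ b then '1' else '0')
  else none

-- proof-side: total row character (the value both programs produce for one row)
def pvRowF (f1 f2 : Char → Char → Char) (neg_mask assoc : Int) (a b c : Char) : Char :=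
  let xa := if neg_mask.land 1 ≠ 0 then pvBitNot a else a
  let xb := if neg_mask.land 2 ≠ 0 then pvBitNot b else b
  let xc := if neg_mask.land 4 ≠ 0 then pvBitNot c else c
  if assoc = 0 then f2 (f1 xa xb) xc else f1 xa (f2 xb xc)

-- proof-side: total cell extraction (equals pyGet? when the index is in range)
def pvCell (s : String) (idx : Int) : Char := (PySem.Str.pyGet? s idx).getD '0'

theorem pvSupported_family (op : String)
    (h : op = "AND" ∨ op = "AND-NOT" ∨ op = "OR" ∨ op = "OR-NOT" ∨ op = "XOR" ∨ op = "XOR-NOT") :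
    ∃ f, pvFamily op = some f := by
  unfold pvFamily
  rcases h with h | h | h | h | h | h <;> (subst h; exact ⟨_, rfl⟩)

theorem pvFamily_eval (op : String) (f : Char → Char → Char) (h : pvFamily op = some f)
    (a b : Char) : pvEvalBinary a b op = some (f a b) := by
  unfold pvFamily at h
  unfold pvEvalBinary
  split_ifs at h with hA hO hX
  · injection h with h; subst h; rw [if_pos hA]
  · injection h with h; subst h; rw [if_neg hA, if_pos hO]
  · injection h with h; subst h; rw [if_neg hA, if_neg hO, if_pos hX]

theorem pvFamily_combine (op : String) (f : Char → Char → Char) (h : pvFamily op = some f)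
    (xs ys : List Char) : pvCombine? xs ys op = some (List.zipWith f xs ys) := by
  unfold pvFamily at h
  unfold pvCombine?
  split_ifs at h with hA hO hX
  · injection h with h; subst h; rw [if_pos hA]
  · injection h with h; subst h; rw [if_neg hA, if_pos hO]
  · injection h with h; subst h; rw [if_neg hA, if_neg hO, if_pos hX]

theorem pvCell_get (s : String) (idx : Int) (h : PySem.Raise.InRange s.toList.length idx) :
    PySem.Str.pyGet? s idx = some (pvCell s idx) := by
  unfold pvCell
  cases hg : PySem.Str.pyGet? s idx with
  | some a => rfl
  | none =>
    rw [PySem.Str.pyGet?_eq, PySem.Chars.pyGet?_eq_listPyGet?,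
      PySem.List.pyGet?_eq_none_iff] at hg
    exact absurd h hg

theorem pvEvalThree_eq (a b c : Char) (op1 op2 : String) (neg_mask assoc : Int)
    (f1 f2 : Char → Char → Char) (h1 : pvFamily op1 = some f1) (h2 : pvFamily op2 = some f2) :
    pvEvalThree a b c op1 op2 neg_mask assoc = some (pvRowF f1 f2 neg_mask assoc a b c) := by
  unfold pvEvalThree pvRowF
  by_cases hA : assoc = 0 <;>
    simp [hA, pvFamily_eval op1 f1 h1, pvFamily_eval op2 f2 h2]

-- A's fold appends exactly the per-row characters
theorem pvFoldA_eq (i j k : Int) (op1 op2 : String) (neg_mask assoc : Int)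
    (f1 f2 : Char → Char → Char) (h1 : pvFamily op1 = some f1) (h2 : pvFamily op2 = some f2) :
    ∀ (l : List String) (acc : List Char),
      (∀ s ∈ l, PySem.Raise.InRange s.toList.length i ∧
        PySem.Raise.InRange s.toList.length j ∧ PySem.Raise.InRange s.toList.length k) →
      l.foldl (pvStepA i j k op1 op2 neg_mask assoc) acc =
        acc ++ l.map (fun s => pvRowF f1 f2 neg_mask assoc (pvCell s i) (pvCell s j) (pvCell s k)) := by
  intro l
  induction l with
  | nil => intro acc _; simp
  | cons s rest ih =>
    intro acc hin
    have hs := hin s (List.mem_cons_self ..)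
    have hstep : pvStepA i j k op1 op2 neg_mask assoc acc s =
        acc ++ [pvRowF f1 f2 neg_mask assoc (pvCell s i) (pvCell s j) (pvCell s k)] := by
      simp only [pvStepA, pvCell_get s i hs.1, pvCell_get s j hs.2.1, pvCell_get s k hs.2.2,
        pvEvalThree_eq _ _ _ op1 op2 neg_mask assoc f1 f2 h1 h2]
    rw [List.foldl_cons, hstep, ih _ (fun s' hs' => hin s' (List.mem_cons_of_mem _ hs'))]
    simp

-- B's column extraction succeeds and is a map
theorem pvCol_eq (l : List String) (idx : Int)
    (h : ∀ s ∈ l, PySem.Raise.InRange s.toList.length idx) :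
    pvCol? l idx = some (l.map (fun s => pvCell s idx)) := by
  unfold pvCol?
  induction l with
  | nil => rfl
  | cons s rest ih =>
    have hs := h s (List.mem_cons_self ..)
    simp only [List.mapM_cons, pvCell_get s idx hs,
      ih (fun s' hs' => h s' (List.mem_cons_of_mem _ hs'))]
    rfl

theorem pvNegCol_map (l : List String) (g : String → Char) :
    pvNegCol (l.map g) = l.map (fun s => pvBitNot (g s)) := by
  simp [pvNegCol, pvBitNot, Function.comp]

-- conditional whole-column negation = map of conditional per-cell negation
theorem pvNegCond (m : Int) (l : List String) (g : String → Char) :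
    (if m ≠ 0 then pvNegCol (l.map g) else l.map g) =
      l.map (fun s => if m ≠ 0 then pvBitNot (g s) else g s) := by
  by_cases h : m = 0 <;> simp [h, pvNegCol_map]

theorem pvZipWith_map_same {α β : Type} (f : β → β → β) (g h : α → β) (l : List α) :
    List.zipWith f (l.map g) (l.map h) = l.map (fun x => f (g x) (h x)) := by
  induction l with
  | nil => rfl
  | cons x xs ih => simp [ih]

-- ===== VERDICT =====
theorem build_three_bit_column_py_spec : Claim_equal_build_three_bit_column_py := by
  intro inputs i j k op1 op2 neg_mask assoc _ hpre
  unfold Spec_build_three_bit_column_py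
  by_cases hnil : inputs = []
  · subst hnil; rfl
  · rcases hpre with h | ⟨hop1, hop2, hin⟩
    · exact absurd h hnil
    obtain ⟨f1, h1⟩ := pvSupported_family op1 hop1
    obtain ⟨f2, h2⟩ := pvSupported_family op2 hop2
    unfold build_three_bit_column_py build_three_bit_column_py_alt
    rw [if_neg hnil,
      pvCol_eq inputs i (fun s hs => (hin s hs).1),
      pvCol_eq inputs j (fun s hs => (hin s hs).2.1),
      pvCol_eq inputs k (fun s hs => (hin s hs).2.2),
      pvFoldA_eq i j k op1 op2 neg_mask assoc f1 f2 h1 h2 inputs [] hin]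
    simp only [pvNegCond, pvFamily_combine op1 f1 h1, pvFamily_combine op2 f2 h2,
      Option.bind_some, pvZipWith_map_same, List.nil_append]
    by_cases hA : assoc = 0 <;> simp [hA, pvRowF]
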